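-- pv_equiv track=rewrite | github.com/Kali98/file_parser | file_parser.py | from_not_given
-- ===== SOURCE A (Python) =====
-- def from_not_given(poem_content):
--     ret = [0,0]
--     for each_line in poem_content:
--         for each_letter in each_line:
--             if each_letter == " ":
--                 ret[0]+=1
--             elif each_letter == "\t":
--                 ret[1] +=1
--     return ret
-- ===== SOURCE B (Python) =====
-- def from_not_given(poem_content):
--     text = "\n".join(poem_content)
--     return [len(text.split(" ")) - 1, len(text.split("\t")) - 1]
-- ===== Notes on version B (the rewrite author's own statement) =====
-- stated objective: faster
-- what changed: instead of a per-character branch-incremented accumulator pair, B joins the lines into one text and counts each separator as the number of pieces produced by splitting on it, minus one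
import Mathlib
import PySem

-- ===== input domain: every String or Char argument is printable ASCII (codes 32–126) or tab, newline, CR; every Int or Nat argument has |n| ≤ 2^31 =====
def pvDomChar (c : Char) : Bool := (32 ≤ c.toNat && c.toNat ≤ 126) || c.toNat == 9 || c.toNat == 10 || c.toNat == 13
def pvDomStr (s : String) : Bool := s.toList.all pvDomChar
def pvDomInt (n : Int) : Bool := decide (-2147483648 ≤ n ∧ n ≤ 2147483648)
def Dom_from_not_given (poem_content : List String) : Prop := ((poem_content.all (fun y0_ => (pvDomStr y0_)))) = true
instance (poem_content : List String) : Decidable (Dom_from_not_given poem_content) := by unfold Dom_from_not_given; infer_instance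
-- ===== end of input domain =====

-- B replaces the per-character branch-incremented accumulators by join + split: each separator count is pieces-1.

-- ===== PORT A =====
-- one branch-incremented pair of accumulators over every character of every line
def from_not_given (poem_content : List String) : List Int :=
  let ret : Int × Int :=
    poem_content.foldl (fun ret each_line =>
      each_line.toList.foldl (fun r each_letter =>
        if each_letter = ' ' then (r.1 + 1, r.2)
        else if each_letter = '\t' then (r.1, r.2 + 1)
        else r) ret) (0, 0)
  [ret.1, ret.2]

-- ===== PORT B =====
-- B: join lines with '\n', then each count = number of split pieces minus one
def from_not_given_alt (poem_content : List String) : List Int :=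
  let text := PySem.Chars.join ['\n'] (poem_content.map String.toList)
  [((PySem.Chars.splitOn text [' ']).length : Int) - 1,
   ((PySem.Chars.splitOn text ['\t']).length : Int) - 1]

-- ===== PRECONDITION & SPEC =====
def Spec_from_not_given (poem_content : List String) (out : List Int) : Prop := out = from_not_given_alt poem_content
instance (poem_content : List String) (out : List Int) : Decidable (Spec_from_not_given poem_content out) := by unfold Spec_from_not_given; infer_instance

-- ===== CLAIM =====
def Claim_equal_from_not_given : Prop := ∀ (poem_content : List String), Dom_from_not_given poem_content → Spec_from_not_given poem_content (from_not_given poem_content)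

-- ===== LEMMAS AND PROOFS =====
theorem splitOn_go_length (c : Char) (fuel : Nat) (l cur : List Char) (acc : List (List Char)) (h : l.length < fuel) :
    (PySem.Chars.splitOn.go [c] fuel l cur acc).length = acc.length + l.count c + 1 := by
  induction fuel generalizing l cur acc with
  | zero => omega
  | succ fuel ih =>
    cases l with
    | nil => simp [PySem.Chars.splitOn.go]
    | cons c' rest =>
      by_cases hc : c' = c
      · subst hc
        simp only [PySem.Chars.splitOn.go]
        rw [if_pos (by simp [List.isPrefixOf]), ih]
        · simp [List.count_cons]; omega
        · simp at h ⊢; omega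
      · have hpre : ([c].isPrefixOf (c' :: rest)) = false := by
          simp [List.isPrefixOf]; exact fun hcc => absurd hcc.symm hc
        simp only [PySem.Chars.splitOn.go, hpre, Bool.false_eq_true, if_false]
        rw [ih]
        · simp [hc]
        · simp at h ⊢; omega

theorem splitOn_length (c : Char) (l : List Char) :
    (PySem.Chars.splitOn l [c]).length = l.count c + 1 := by
  unfold PySem.Chars.splitOn
  rw [splitOn_go_length] <;> simp

theorem count_join_newline (c : Char) (hc : c ≠ '\n') (ls : List (List Char)) :
    (PySem.Chars.join ['\n'] ls).count c = (ls.flatMap id).count c := by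
  induction ls with
  | nil => simp [PySem.Chars.join, List.intercalate, List.intersperse]
  | cons a t ih =>
    cases t with
    | nil => simp [PySem.Chars.join, List.intercalate]
    | cons b t' =>
      have : PySem.Chars.join ['\n'] (a :: b :: t') = a ++ ['\n'] ++ PySem.Chars.join ['\n'] (b :: t') := by
        simp [PySem.Chars.join, List.intercalate, List.intersperse]
      rw [this]
      simp only [List.count_append, ih, List.flatMap_cons, id]
      have h0 : List.count c ['\n'] = 0 := List.count_eq_zero.mpr (by simpa using hc)
      omega

theorem inner_fold (l : List Char) (a b : Int) :
    l.foldl (fun r each_letter =>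
        if each_letter = ' ' then (r.1 + 1, r.2)
        else if each_letter = '\t' then (r.1, r.2 + 1)
        else r) (a, b)
      = (a + (l.count ' ' : Int), b + (l.count '\t' : Int)) := by
  induction l generalizing a b with
  | nil => simp
  | cons c t ih =>
    by_cases h : c = ' '
    · subst h; simp [List.foldl, ih]; ring
    · by_cases h2 : c = '\t'
      · subst h2; simp [List.foldl, ih]; ring
      · simp [List.foldl, h, h2, ih]

theorem outer_fold (ls : List String) (a b : Int) :
    ls.foldl (fun ret each_line =>
      each_line.toList.foldl (fun r each_letter =>
        if each_letter = ' ' then (r.1 + 1, r.2)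
        else if each_letter = '\t' then (r.1, r.2 + 1)
        else r) ret) (a, b)
      = (a + ((ls.flatMap String.toList).count ' ' : Int),
         b + ((ls.flatMap String.toList).count '\t' : Int)) := by
  induction ls generalizing a b with
  | nil => simp
  | cons s t ih =>
    simp only [List.foldl, inner_fold, ih, List.flatMap_cons, List.count_append]
    push_cast; rw [Prod.mk.injEq]; constructor <;> ring

-- ===== VERDICT =====
theorem from_not_given_spec : Claim_equal_from_not_given := by
  intro poem_content _
  unfold Spec_from_not_given from_not_given from_not_given_alt
  simp only [outer_fold, splitOn_length, count_join_newline ' ' (by decide),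
    count_join_newline '\t' (by decide), List.flatMap_map]
  push_cast
  simp
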